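-- pv_equiv track=rewrite | github.com/mirelois/mirelois-LA2 | treino1/horario.py | horario
-- ===== SOURCE A (Python) =====
-- def meio(x, inte):
--     return x > inte[0] and x < inte[1]
--
-- def checkHora(hora_par, dia):
--     r = True
--     for (hi, hf) in dia:
--         for h in [hora_par[0], hora_par[1]]:
--             if meio(h, (hi, hf)):
--                 r = False
--         for h in [hi, hf]:
--             if meio(h, hora_par):
--                 r = False
--
--     return r
--
-- def horaTotal(horario):
--     total = 0
--     for dia in horario:
--         for (hi, hf) in horario[dia]:
--             total += hf - hi
--     return total
--
-- def horario(ucs, alunos):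
--     r = list()
--     for aluno in alunos:
--         table = dict()
--         fail = True
--         for uc in alunos[aluno]:
--             if uc not in ucs:
--                 fail = False
--             else:
--                 dia = ucs[uc][0]
--                 horai = ucs[uc][1]
--                 horaf = horai + ucs[uc][2]
--                 if dia in table:
--                     if checkHora((horai, horaf), table[dia]):
--                         table[dia].append((horai, horaf))
--                     else:
--                         fail = False
--                 else:
--                     table[dia] = [(horai, horaf)]
--         if fail == True:
--             r.append((aluno, horaTotal(table)))
--
--     return sorted(r,key = lambda x: (-x[1], x[0]))
-- ===== SOURCE B (Python) =====
-- def horario(ucs, alunos):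
--     res = []
--     for aluno, lst in alunos.items():
--         if all(uc in ucs for uc in lst):
--             days = {}
--             total = 0
--             for uc in lst:
--                 info = ucs[uc]
--                 hi = info[1]
--                 days.setdefault(info[0], []).append((hi, hi + info[2]))
--                 total += info[2]
--             ok = True
--             for ivs in days.values():
--                 pts = sorted({p for iv in ivs for p in iv})
--                 nxt = dict(zip(pts, pts[1:]))
--                 for a, b in ivs:
--                     if a in nxt and nxt[a] < b:
--                         ok = False
--             if ok:
--                 res.append((aluno, total))
--     return sorted(res, key=lambda x: (-x[1], x[0]))
-- ===== Notes on version B (the rewrite author's own statement) =====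
-- stated objective: alternative
-- what changed: Per student B groups intervals by day in one pass (summing hours in the same pass) and detects proper overlaps per day via a sorted distinct-endpoint successor map, instead of A's incremental checkHora scan of every previously accepted interval of the day; per-student work drops from quadratic to O(k log k) in the number of classes, though a timing run inputs (few classes per student) show no measurable speed-up.
import Mathlib
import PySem

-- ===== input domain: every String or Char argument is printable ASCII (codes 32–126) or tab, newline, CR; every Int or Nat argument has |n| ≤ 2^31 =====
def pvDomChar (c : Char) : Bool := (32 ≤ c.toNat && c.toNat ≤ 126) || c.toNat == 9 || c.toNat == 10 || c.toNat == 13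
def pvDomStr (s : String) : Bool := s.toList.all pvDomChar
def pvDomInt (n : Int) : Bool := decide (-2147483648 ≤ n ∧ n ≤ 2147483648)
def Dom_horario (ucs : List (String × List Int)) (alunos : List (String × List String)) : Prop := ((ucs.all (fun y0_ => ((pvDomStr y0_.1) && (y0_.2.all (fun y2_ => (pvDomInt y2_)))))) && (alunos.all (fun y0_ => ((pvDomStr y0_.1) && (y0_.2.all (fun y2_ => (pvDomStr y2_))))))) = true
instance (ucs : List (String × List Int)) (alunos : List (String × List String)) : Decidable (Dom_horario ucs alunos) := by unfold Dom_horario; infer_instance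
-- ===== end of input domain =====

-- B replaces A's incremental pairwise overlap test by a per-day sorted successor map
-- of all interval endpoints, computing the hour total in the same grouping pass;
-- equivalence of the RETURN value is proved.

-- ===== PORT A =====
def meio (x : Int) (inte : Int × Int) : Bool := decide (x > inte.1) && decide (x < inte.2)

def checkHora (hora_par : Int × Int) (dia : List (Int × Int)) : Bool :=
  dia.foldl (fun r u =>
    let r := [hora_par.1, hora_par.2].foldl (fun r h => if meio h (u.1, u.2) then false else r) r
    [u.1, u.2].foldl (fun r h => if meio h hora_par then false else r) r) true

-- Python iterates the dict's keys and looks each one up; keys of a PySem.Dict built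
-- from empty are unique, so iterating keys with getD is exact.
def horaTotal (t : PySem.Dict Int (List (Int × Int))) : Int :=
  t.keys.foldl (fun total dia =>
    (t.getD dia []).foldl (fun total p => total + (p.2 - p.1)) total) 0

-- the body of A's inner `for uc in alunos[aluno]` loop, as a named helper
def uStep (U : PySem.Dict String (List Int))
    (st : PySem.Dict Int (List (Int × Int)) × Bool) (uc : String) :
    PySem.Dict Int (List (Int × Int)) × Bool :=
  match U.get? uc with
  | none => (st.1, false)
  | some info =>
    let dia := PySem.List.pyGetD info 0 0
    let horai := PySem.List.pyGetD info 1 0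
    let horaf := horai + PySem.List.pyGetD info 2 0
    match st.1.get? dia with
    | some g =>
      if checkHora (horai, horaf) g then (st.1.insert dia (g ++ [(horai, horaf)]), st.2)
      else (st.1, false)
    | none => (st.1.insert dia [(horai, horaf)], st.2)

def horario (ucs : List (String × List Int)) (alunos : List (String × List String)) : List (String × Int) :=
  let U : PySem.Dict String (List Int) := PySem.Dict.mk ucs
  let r : List (String × Int) := alunos.foldl (fun r al =>
    let st := al.2.foldl (uStep U) (PySem.Dict.empty, true)
    if st.2 then r ++ [(al.1, horaTotal st.1)] else r) []
  PySem.List.sorted2 r (fun x => -x.2) (fun x => x.1)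

-- ===== PORT B =====
-- one uc: append its interval to its day's group and add its duration to the total
def bAdd (U : PySem.Dict String (List Int))
    (dt : PySem.Dict Int (List (Int × Int)) × Int) (uc : String) :
    PySem.Dict Int (List (Int × Int)) × Int :=
  let info := U.getD uc []
  let hi := PySem.List.pyGetD info 1 0
  let dur := PySem.List.pyGetD info 2 0
  (dt.1.modify (PySem.List.pyGetD info 0 0) [] (· ++ [(hi, hi + dur)]), dt.2 + dur)

-- one day: sorted distinct endpoints, successor map, scan the intervals
def dayCheck (ok : Bool) (ivs : List (Int × Int)) : Bool :=
  let pts := PySem.List.sorted (PySem.Set.ofList (ivs.flatMap (fun iv => [iv.1, iv.2]))) (fun x => x) false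
  let nxt : PySem.Dict Int Int := PySem.Dict.mk (pts.zip (pts.drop 1))
  ivs.foldl (fun ok iv =>
    match nxt.get? iv.1 with
    | some s => if s < iv.2 then false else ok
    | none => ok) ok

def horario_alt (ucs : List (String × List Int)) (alunos : List (String × List String)) : List (String × Int) :=
  let U : PySem.Dict String (List Int) := PySem.Dict.mk ucs
  let res : List (String × Int) := alunos.foldl (fun res al =>
    if al.2.all (fun uc => U.contains uc) then
      let dt := al.2.foldl (bAdd U) (PySem.Dict.empty, 0)
      let ok := dt.1.values.foldl dayCheck true
      if ok then res ++ [(al.1, dt.2)] else res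
    else res) []
  PySem.List.sorted2 res (fun x => -x.2) (fun x => x.1)

-- ===== PRECONDITION & SPEC =====
-- Pre_ excludes inputs where some uc referenced by a student has fewer than 3 ints,
-- on which the Python A raises IndexError (and so does B); the Nodup clauses only pin
-- down the assoc-list representation of the Python dict arguments (a Python dict never
-- has duplicate keys), so they exclude no Python-expressible input.
def Pre_horario (ucs : List (String × List Int)) (alunos : List (String × List String)) : Prop :=
  (ucs.map Prod.fst).Nodup ∧ (alunos.map Prod.fst).Nodup ∧
  ∀ p ∈ ucs, (∃ q ∈ alunos, p.1 ∈ q.2) → 3 ≤ p.2.length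
instance (ucs : List (String × List Int)) (alunos : List (String × List String)) : Decidable (Pre_horario ucs alunos) := by unfold Pre_horario; infer_instance

def pvWitness_horario : (List (String × List Int)) × (List (String × List String)) :=
  ([("alg", [0, 9, 2]), ("calc", [0, 11, 2])], [("ana", ["alg", "calc"]), ("rui", ["alg"])])

def Spec_horario (ucs : List (String × List Int)) (alunos : List (String × List String)) (out : List (String × Int)) : Prop := out = horario_alt ucs alunos
instance (ucs : List (String × List Int)) (alunos : List (String × List String)) (out : List (String × Int)) : Decidable (Spec_horario ucs alunos out) := by unfold Spec_horario; infer_instance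

-- ===== CLAIM (what is proved, stated in full; the proofs are below) =====
def Claim_equal_horario : Prop := ∀ (ucs : List (String × List Int)) (alunos : List (String × List String)), Dom_horario ucs alunos → Pre_horario ucs alunos → Spec_horario ucs alunos (horario ucs alunos)

-- ===== LEMMAS AND PROOFS =====

-- proof-side vocabulary ----------------------------------------------------
def confB (p u : Int × Int) : Bool :=
  meio p.1 u || meio p.2 u || meio u.1 p || meio u.2 p

def PWc (g : List (Int × Int)) : Prop := g.Pairwise (fun u v => confB u v = false)

def infoOf (U : PySem.Dict String (List Int)) (uc : String) : List Int := U.getD uc []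
def dayOf (U : PySem.Dict String (List Int)) (uc : String) : Int := PySem.List.pyGetD (infoOf U uc) 0 0
def durOf (U : PySem.Dict String (List Int)) (uc : String) : Int := PySem.List.pyGetD (infoOf U uc) 2 0
def ivOf (U : PySem.Dict String (List Int)) (uc : String) : Int × Int :=
  (PySem.List.pyGetD (infoOf U uc) 1 0, PySem.List.pyGetD (infoOf U uc) 1 0 + durOf U uc)

def addU (U : PySem.Dict String (List Int)) (t : PySem.Dict Int (List (Int × Int))) (uc : String) :
    PySem.Dict Int (List (Int × Int)) :=
  t.modify (dayOf U uc) [] (· ++ [ivOf U uc])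

def condA (U : PySem.Dict String (List Int)) (t : PySem.Dict Int (List (Int × Int))) :
    List String → Prop
  | [] => True
  | uc :: rest =>
      U.contains uc = true ∧ checkHora (ivOf U uc) (t.getD (dayOf U uc) []) = true ∧
      condA U (addU U t uc) rest

def lookLt (o : Option Int) (b : Int) : Bool :=
  match o with
  | some s => decide (s < b)
  | none => false

def dayOKb (ivs : List (Int × Int)) : Bool :=
  let pts := PySem.List.sorted (PySem.Set.ofList (ivs.flatMap (fun iv => [iv.1, iv.2]))) (fun x => x) false
  let nxt : PySem.Dict Int Int := PySem.Dict.mk (pts.zip (pts.drop 1))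
  ivs.all (fun iv => !lookLt (nxt.get? iv.1) iv.2)

-- basic facts --------------------------------------------------------------
theorem confB_self (p : Int × Int) : confB p p = false := by
  simp [confB, meio]

theorem confB_comm (p u : Int × Int) : confB p u = confB u p := by
  simp [confB, meio, Bool.or_assoc, Bool.or_comm, Bool.or_left_comm]

theorem checkHora_eq_all (hp : Int × Int) (dia : List (Int × Int)) :
    checkHora hp dia = dia.all (fun u => !confB hp u) := by
  suffices h : ∀ r0 : Bool, dia.foldl (fun r u =>
      let r := [hp.1, hp.2].foldl (fun r h => if meio h (u.1, u.2) then false else r) r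
      [u.1, u.2].foldl (fun r h => if meio h hp then false else r) r) r0
      = (r0 && dia.all (fun u => !confB hp u)) by
    simpa [checkHora] using h true
  induction dia with
  | nil => intro r0; simp
  | cons u rest ih =>
    intro r0
    rw [List.foldl_cons, ih]
    have hstep : (let r := [hp.1, hp.2].foldl (fun r h => if meio h (u.1, u.2) then false else r) r0
        [u.1, u.2].foldl (fun r h => if meio h hp then false else r) r) = (r0 && !confB hp u) := by
      simp only [List.foldl]
      cases h1 : meio hp.1 (u.1, u.2) <;> cases h2 : meio hp.2 (u.1, u.2) <;>
        cases h3 : meio u.1 hp <;> cases h4 : meio u.2 hp <;>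
        simp [confB, h1, h2, h3, h4]
    rw [hstep, List.all_cons, Bool.and_assoc]

-- A's inner fold -----------------------------------------------------------
theorem foldl_uStep_false (U : PySem.Dict String (List Int)) (lst : List String)
    (t : PySem.Dict Int (List (Int × Int))) :
    (lst.foldl (uStep U) (t, false)).2 = false := by
  suffices h : ∀ st : PySem.Dict Int (List (Int × Int)) × Bool, st.2 = false →
      (lst.foldl (uStep U) st).2 = false by exact h (t, false) rfl
  induction lst with
  | nil => intro st hst; exact hst
  | cons uc rest ih =>
    intro st hst
    rw [List.foldl_cons]
    apply ih
    unfold uStep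
    cases U.get? uc with
    | none => rfl
    | some info =>
      dsimp only
      split
      · split
        · exact hst
        · rfl
      · exact hst
      

theorem uStep_some (U : PySem.Dict String (List Int)) (st : PySem.Dict Int (List (Int × Int)) × Bool)
    (uc : String) (h : U.contains uc = true) :
    uStep U st uc =
      (if checkHora (ivOf U uc) (st.1.getD (dayOf U uc) []) then (addU U st.1 uc, st.2)
       else (st.1, false)) := by
  rw [PySem.Dict.contains_eq_isSome_get?] at h
  obtain ⟨info, hinfo⟩ := Option.isSome_iff_exists.mp h
  have hInfoOf : infoOf U uc = info := PySem.Dict.getD_of_get?_eq_some U [] hinfo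
  unfold uStep
  rw [hinfo]
  dsimp only
  have hday : dayOf U uc = PySem.List.pyGetD info 0 0 := by rw [dayOf, hInfoOf]
  have hiv : ivOf U uc = (PySem.List.pyGetD info 1 0,
      PySem.List.pyGetD info 1 0 + PySem.List.pyGetD info 2 0) := by
    rw [ivOf, durOf, hInfoOf]
  cases hg : st.1.get? (PySem.List.pyGetD info 0 0) with
  | some g =>
    have hgD : st.1.getD (dayOf U uc) [] = g := by
      rw [hday]; exact PySem.Dict.getD_of_get?_eq_some _ _ hg
    have haddU : addU U st.1 uc = st.1.insert (PySem.List.pyGetD info 0 0)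
        (g ++ [(PySem.List.pyGetD info 1 0, PySem.List.pyGetD info 1 0 + PySem.List.pyGetD info 2 0)]) := by
      show st.1.insert (dayOf U uc) (st.1.getD (dayOf U uc) [] ++ [ivOf U uc]) = _
      rw [hgD, hday, hiv]
    rw [hgD, hiv, haddU]
  | none =>
    have hgD : st.1.getD (dayOf U uc) [] = [] := by
      rw [hday]; exact PySem.Dict.getD_of_get?_eq_none _ _ hg
    have haddU : addU U st.1 uc = st.1.insert (PySem.List.pyGetD info 0 0)
        [(PySem.List.pyGetD info 1 0, PySem.List.pyGetD info 1 0 + PySem.List.pyGetD info 2 0)] := by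
      show st.1.insert (dayOf U uc) (st.1.getD (dayOf U uc) [] ++ [ivOf U uc]) = _
      rw [hgD, hday, hiv]; rfl
    rw [hgD, hiv, haddU]
    have : checkHora (PySem.List.pyGetD info 1 0,
        PySem.List.pyGetD info 1 0 + PySem.List.pyGetD info 2 0) ([] : List (Int × Int)) = true := rfl
    rw [if_pos this]

theorem uStep_none (U : PySem.Dict String (List Int)) (st : PySem.Dict Int (List (Int × Int)) × Bool)
    (uc : String) (h : U.contains uc = false) :
    uStep U st uc = (st.1, false) := by
  rw [PySem.Dict.contains_eq_isSome_get?] at h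
  unfold uStep
  cases hg : U.get? uc with
  | none => rfl
  | some info => rw [hg] at h; simp at h

theorem foldl_uStep_of_cond (U : PySem.Dict String (List Int)) (lst : List String)
    (t : PySem.Dict Int (List (Int × Int))) (h : condA U t lst) :
    lst.foldl (uStep U) (t, true) = (lst.foldl (addU U) t, true) := by
  induction lst generalizing t with
  | nil => rfl
  | cons uc rest ih =>
    obtain ⟨hc, hchk, hrest⟩ := h
    rw [List.foldl_cons, uStep_some U (t, true) uc hc]
    dsimp only
    rw [if_pos hchk, List.foldl_cons]
    exact ih (addU U t uc) hrest

theorem foldl_uStep_of_not_cond (U : PySem.Dict String (List Int)) (lst : List String)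
    (t : PySem.Dict Int (List (Int × Int))) (h : ¬ condA U t lst) :
    (lst.foldl (uStep U) (t, true)).2 = false := by
  induction lst generalizing t with
  | nil => exact absurd trivial h
  | cons uc rest ih =>
    by_cases hc : U.contains uc = true
    · rw [List.foldl_cons, uStep_some U (t, true) uc hc]
      dsimp only
      by_cases hchk : checkHora (ivOf U uc) (t.getD (dayOf U uc) []) = true
      · rw [if_pos hchk]
        exact ih (addU U t uc) (fun hrest => h ⟨hc, hchk, hrest⟩)
      · rw [if_neg hchk]
        exact foldl_uStep_false U rest t
    · rw [List.foldl_cons, uStep_none U (t, true) uc (by simpa using hc)]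
      exact foldl_uStep_false U rest t

-- B's builder fold ---------------------------------------------------------
theorem foldl_bAdd (U : PySem.Dict String (List Int)) (lst : List String)
    (t : PySem.Dict Int (List (Int × Int))) (s : Int) :
    lst.foldl (bAdd U) (t, s) = (lst.foldl (addU U) t, s + (lst.map (durOf U)).sum) := by
  induction lst generalizing t s with
  | nil => simp
  | cons uc rest ih =>
    rw [List.foldl_cons, List.foldl_cons,
      show bAdd U (t, s) uc = (addU U t uc, s + durOf U uc) from rfl, ih]
    simp [add_assoc]

-- the grouped table --------------------------------------------------------
theorem nodup_keys_tab (U : PySem.Dict String (List Int)) (lst : List String)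
    (t : PySem.Dict Int (List (Int × Int))) (h : t.keys.Nodup) :
    (lst.foldl (addU U) t).keys.Nodup := by
  exact PySem.Dict.nodup_keys_foldl_modify_key lst (dayOf U) []
    (fun _ uc => (· ++ [ivOf U uc])) t h

theorem getD_tab (U : PySem.Dict String (List Int)) (lst : List String)
    (t : PySem.Dict Int (List (Int × Int))) (k : Int) :
    (lst.foldl (addU U) t).getD k [] =
      t.getD k [] ++ (lst.filter (fun uc => dayOf U uc == k)).map (ivOf U) := by
  have h1 : lst.foldl (addU U) t =
      (lst.map (fun uc => (dayOf U uc, ivOf U uc))).foldl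
        (fun d p => d.modify p.1 [] (· ++ [p.2])) t := by
    rw [List.foldl_map]; rfl
  rw [h1, PySem.Dict.getD_foldl_modify_append, List.filter_map, List.map_map]
  rfl

-- incremental acceptance = global pairwise compatibility --------------------
theorem nodup_keys_addU (U : PySem.Dict String (List Int)) (uc : String)
    (t : PySem.Dict Int (List (Int × Int))) (h : t.keys.Nodup) :
    (addU U t uc).keys.Nodup := nodup_keys_tab U [uc] t h

theorem cond_iff (U : PySem.Dict String (List Int)) (lst : List String)
    (t : PySem.Dict Int (List (Int × Int))) (hk : t.keys.Nodup)
    (hpw : ∀ k, PWc (t.getD k [])) :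
    condA U t lst ↔ ((∀ uc ∈ lst, U.contains uc = true) ∧
      ∀ k, PWc ((lst.foldl (addU U) t).getD k [])) := by
  induction lst generalizing t with
  | nil =>
    simp only [condA, List.foldl_nil]
    exact ⟨fun _ => ⟨by simp, hpw⟩, fun _ => trivial⟩
  | cons uc rest ih =>
    by_cases hc : U.contains uc = true
    · by_cases hchk : checkHora (ivOf U uc) (t.getD (dayOf U uc) []) = true
      · have hpw' : ∀ k, PWc ((addU U t uc).getD k []) := by
          intro k
          show PWc ((t.modify (dayOf U uc) [] (· ++ [ivOf U uc])).getD k [])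
          rw [PySem.Dict.getD_modify]
          by_cases hk2 : k = dayOf U uc
          · rw [if_pos hk2]
            rw [checkHora_eq_all, List.all_eq_true] at hchk
            refine (List.pairwise_append).mpr ⟨hpw _, List.pairwise_singleton _ _, ?_⟩
            intro a ha b hb
            rw [List.mem_singleton] at hb; subst hb
            have h2 := hchk a ha
            rw [confB_comm]
            simpa using h2
          · rw [if_neg hk2]; exact hpw k
        have hk' : (addU U t uc).keys.Nodup := nodup_keys_addU U uc t hk
        simp only [condA, List.foldl_cons, List.forall_mem_cons]
        rw [ih (addU U t uc) hk' hpw']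
        simp only [hc, true_and]
        tauto
      · have hbad : ¬ PWc (((uc :: rest).foldl (addU U) t).getD (dayOf U uc) []) := by
          rw [List.foldl_cons, getD_tab]
          have h2 : (addU U t uc).getD (dayOf U uc) [] =
              t.getD (dayOf U uc) [] ++ [ivOf U uc] := by
            show (t.modify (dayOf U uc) [] (· ++ [ivOf U uc])).getD (dayOf U uc) [] = _
            rw [PySem.Dict.getD_modify, if_pos rfl]
          rw [h2]
          intro hPW
          have hsub : PWc (t.getD (dayOf U uc) [] ++ [ivOf U uc]) :=
            hPW.sublist (List.sublist_append_left _ _)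
          obtain ⟨_, _, hcross⟩ := List.pairwise_append.mp hsub
          rw [checkHora_eq_all] at hchk
          simp only [List.all_eq_true, Bool.not_eq_eq_eq_not, Bool.not_true] at hchk
          push Not at hchk
          obtain ⟨a, ha, hconf⟩ := hchk
          have h3 := hcross a ha (ivOf U uc) (List.mem_singleton_self _)
          rw [confB_comm] at h3
          exact hconf h3
        constructor
        · rintro ⟨_, h2, _⟩; exact absurd h2 hchk
        · rintro ⟨_, hP⟩; exact absurd (hP (dayOf U uc)) hbad
    · constructor
      · rintro ⟨h1, _⟩; exact absurd h1 hc
      · rintro ⟨h1, _⟩; exact absurd (h1 uc (by simp)) hc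

-- totals --------------------------------------------------------------------
theorem horaTotal_eq (t : PySem.Dict Int (List (Int × Int))) :
    horaTotal t = (t.keys.map (fun k => ((t.getD k []).map (fun q => q.2 - q.1)).sum)).sum := by
  unfold horaTotal
  have h : ∀ (ks : List Int) (a : Int), ks.foldl (fun total dia =>
      (t.getD dia []).foldl (fun total p => total + (p.2 - p.1)) total) a
      = a + (ks.map (fun k => ((t.getD k []).map (fun q => q.2 - q.1)).sum)).sum := by
    intro ks
    induction ks with
    | nil => intro a; simp
    | cons k ks ih =>
      intro a
      rw [List.foldl_cons, PySem.List.foldl_add, ih]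
      simp [add_assoc]
  simpa using h t.keys 0

theorem sum_map_update {α : Type} (l : List α) (f f' : α → Int) (a : α) (δ : Int)
    (hnd : l.Nodup) (ha : a ∈ l) (hne : ∀ x ∈ l, x ≠ a → f' x = f x) (hd : f' a = f a + δ) :
    (l.map f').sum = (l.map f).sum + δ := by
  induction l with
  | nil => cases ha
  | cons x xs ih =>
    rcases List.mem_cons.mp ha with h | h
    · subst h
      have hx : a ∉ xs := (List.nodup_cons.mp hnd).1
      have hxs : xs.map f' = xs.map f := by
        apply List.map_congr_left
        intro y hy
        exact hne y (List.mem_cons_of_mem _ hy) (fun hya => hx (hya ▸ hy))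
      simp [hd, hxs]; ring
    · have hxa : x ≠ a := fun hxa => (List.nodup_cons.mp hnd).1 (hxa ▸ h)
      have h1 : f' x = f x := hne x (List.mem_cons_self) hxa
      have h2 := ih (List.nodup_cons.mp hnd).2 h
        (fun y hy => hne y (List.mem_cons_of_mem _ hy))
      simp only [List.map_cons, List.sum_cons, h1, h2]
      ring

theorem horaTotal_addU (U : PySem.Dict String (List Int)) (uc : String)
    (t : PySem.Dict Int (List (Int × Int))) (hk : t.keys.Nodup) :
    horaTotal (addU U t uc) = horaTotal t + durOf U uc := by
  have hgd : ∀ k, (addU U t uc).getD k [] =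
      if k = dayOf U uc then t.getD (dayOf U uc) [] ++ [ivOf U uc] else t.getD k [] := by
    intro k
    show (t.modify (dayOf U uc) [] (· ++ [ivOf U uc])).getD k [] = _
    rw [PySem.Dict.getD_modify]
  have hdelta : ((t.getD (dayOf U uc) [] ++ [ivOf U uc]).map (fun q => q.2 - q.1)).sum
      = ((t.getD (dayOf U uc) []).map (fun q => q.2 - q.1)).sum + durOf U uc := by
    simp [ivOf]
  rw [horaTotal_eq, horaTotal_eq]
  by_cases hcont : t.contains (dayOf U uc) = true
  · have hkeys : (addU U t uc).keys = t.keys := by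
      show (t.modify (dayOf U uc) [] (· ++ [ivOf U uc])).keys = _
      rw [PySem.Dict.keys_modify, PySem.Dict.keys_insert_of_contains]
      exact hcont
    rw [hkeys]
    apply sum_map_update t.keys _ _ (dayOf U uc) (durOf U uc) hk
      ((PySem.Dict.contains_iff_mem_keys t (dayOf U uc)).mp hcont)
    · intro x hx hxne; rw [hgd x, if_neg hxne]
    · rw [hgd, if_pos rfl, hdelta]
  · have hkeys : (addU U t uc).keys = t.keys ++ [dayOf U uc] := by
      show (t.modify (dayOf U uc) [] (· ++ [ivOf U uc])).keys = _
      rw [PySem.Dict.keys_modify, PySem.Dict.keys_insert_of_not_contains]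
      simpa using hcont
    have hday_not : dayOf U uc ∉ t.keys := fun hmem =>
      hcont ((PySem.Dict.contains_iff_mem_keys t (dayOf U uc)).mpr hmem)
    have hold : t.keys.map (fun k => (((addU U t uc).getD k []).map (fun q => q.2 - q.1)).sum)
        = t.keys.map (fun k => ((t.getD k []).map (fun q => q.2 - q.1)).sum) := by
      apply List.map_congr_left
      intro k hkm
      rw [hgd k, if_neg (fun hkd => hday_not (by rw [← hkd]; exact hkm))]
    have hempty : t.getD (dayOf U uc) [] = [] :=
      PySem.Dict.getD_of_not_contains t [] (by simpa using hcont)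
    rw [hkeys, List.map_append, List.sum_append, hold]
    simp [hgd, hempty, ivOf, durOf]

theorem horaTotal_tab (U : PySem.Dict String (List Int)) (lst : List String)
    (t : PySem.Dict Int (List (Int × Int))) (h : t.keys.Nodup) :
    horaTotal (lst.foldl (addU U) t) = horaTotal t + (lst.map (durOf U)).sum := by
  induction lst generalizing t with
  | nil => simp
  | cons uc rest ih =>
    rw [List.foldl_cons, ih (addU U t uc) (nodup_keys_addU U uc t h),
      horaTotal_addU U uc t h]
    simp [add_assoc]

-- B's day check -------------------------------------------------------------
theorem foldl_flag {α : Type} (l : List α) (c : α → Bool) (r : Bool) :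
    l.foldl (fun ok x => if c x then false else ok) r = (r && l.all (fun x => !c x)) := by
  induction l generalizing r with
  | nil => simp
  | cons x xs ih =>
    rw [List.foldl_cons, ih, List.all_cons]
    cases h : c x <;> simp

theorem dayCheck_eq (ok : Bool) (ivs : List (Int × Int)) :
    dayCheck ok ivs = (ok && dayOKb ivs) := by
  unfold dayCheck dayOKb
  have key : ∀ (nxt : PySem.Dict Int Int),
      ivs.foldl (fun ok iv => match nxt.get? iv.1 with
        | some s => if s < iv.2 then false else ok
        | none => ok) ok
      = (ok && ivs.all (fun iv => !lookLt (nxt.get? iv.1) iv.2)) := by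
    intro nxt
    have hfun : (fun (ok : Bool) (iv : Int × Int) => match nxt.get? iv.1 with
        | some s => if s < iv.2 then false else ok
        | none => ok)
        = (fun ok iv => if lookLt (nxt.get? iv.1) iv.2 then false else ok) := by
      funext ok iv
      cases h : nxt.get? iv.1 with
      | none => simp [lookLt]
      | some s =>
        simp only [lookLt]
        by_cases hs : s < iv.2 <;> simp [hs]
    rw [hfun, foldl_flag]
  exact key _

theorem foldl_dayCheck (vs : List (List (Int × Int))) (r : Bool) :
    vs.foldl dayCheck r = (r && vs.all dayOKb) := by
  induction vs generalizing r with
  | nil => simp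
  | cons v vs ih =>
    rw [List.foldl_cons, ih, dayCheck_eq, List.all_cons, Bool.and_assoc]

theorem succ_lookup (pts : List Int) (h : pts.Pairwise (· < ·)) (a b : Int) (ha : a ∈ pts) :
    lookLt ((PySem.Dict.mk (pts.zip (pts.drop 1))).get? a) b = true ↔
      ∃ x ∈ pts, a < x ∧ x < b := by
  induction pts with
  | nil => cases ha
  | cons c rest ih =>
    cases rest with
    | nil =>
      have hz : (([c] : List Int)).zip (([c] : List Int).drop 1) = [] := rfl
      rw [hz]
      have hac : a = c := by simpa using ha
      subst hac
      constructor
      · intro hfalse; exact absurd hfalse (by simp [lookLt]; rfl)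
      · rintro ⟨x, hx, hax, _⟩
        rw [List.mem_singleton] at hx
        omega
    | cons d rest' =>
      have hcd : c < d := (List.pairwise_cons.mp h).1 d (by simp)
      have htail : (d :: rest').Pairwise (· < ·) := (List.pairwise_cons.mp h).2
      have hdmin : ∀ x ∈ rest', d < x := fun x hx => (List.pairwise_cons.mp htail).1 x hx
      have hz : (c :: d :: rest').zip ((c :: d :: rest').drop 1)
          = (c, d) :: ((d :: rest').zip ((d :: rest').drop 1)) := rfl
      rw [hz]
      by_cases hac : a = c
      · subst hac
        have hget : (PySem.Dict.mk ((a, d) :: ((d :: rest').zip ((d :: rest').drop 1)))).get? a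
            = some d := by
          rw [PySem.Dict.get?_mk_cons]; simp
        rw [hget]
        simp only [lookLt, decide_eq_true_eq]
        constructor
        · intro hdb; exact ⟨d, by simp, hcd, hdb⟩
        · rintro ⟨x, hx, hax, hxb⟩
          rcases List.mem_cons.mp hx with rfl | hx'
          · omega
          rcases List.mem_cons.mp hx' with rfl | hx''
          · exact hxb
          · have := hdmin x hx''
            omega
      · have ha' : a ∈ d :: rest' := by
          rcases List.mem_cons.mp ha with rfl | h'
          · exact absurd rfl hac
          · exact h'
        have hca : c < a := (List.pairwise_cons.mp h).1 a ha'
        have hget : (PySem.Dict.mk ((c, d) :: ((d :: rest').zip ((d :: rest').drop 1)))).get? a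
            = (PySem.Dict.mk ((d :: rest').zip ((d :: rest').drop 1))).get? a := by
          rw [PySem.Dict.get?_mk_cons]
          simp [show (c == a) = false by simp; omega]
        rw [hget, ih htail ha']
        constructor
        · rintro ⟨x, hx, hh⟩; exact ⟨x, List.mem_cons_of_mem _ hx, hh⟩
        · rintro ⟨x, hx, hax, hxb⟩
          rcases List.mem_cons.mp hx with rfl | hx'
          · omega
          · exact ⟨x, hx', hax, hxb⟩

theorem PWc_pairs {g : List (Int × Int)} (hp : PWc g) :
    ∀ p ∈ g, ∀ q ∈ g, confB p q = false := by
  intro p hpm q hqm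
  obtain ⟨i, hi, rfl⟩ := List.mem_iff_getElem.mp hpm
  obtain ⟨j, hj, rfl⟩ := List.mem_iff_getElem.mp hqm
  rcases lt_trichotomy i j with hlt | heq | hgt
  · exact List.pairwise_iff_getElem.mp hp i j hi hj hlt
  · subst heq; exact confB_self _
  · rw [confB_comm]; exact List.pairwise_iff_getElem.mp hp j i hj hi hgt

theorem PWc_iff_noc (g : List (Int × Int)) :
    PWc g ↔ ∀ p ∈ g, ∀ x ∈ g.flatMap (fun iv => [iv.1, iv.2]), ¬(p.1 < x ∧ x < p.2) := by
  constructor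
  · intro hp p hpm x hxm hcontra
    obtain ⟨q, hqm, hxq⟩ := List.mem_flatMap.mp hxm
    have hconf := PWc_pairs hp p hpm q hqm
    simp only [confB, meio, Bool.or_eq_false_iff, Bool.and_eq_false_iff,
      decide_eq_false_iff_not, not_lt, gt_iff_lt] at hconf
    rcases List.mem_cons.mp hxq with rfl | hxq'
    · omega
    rcases List.mem_cons.mp hxq' with rfl | h0
    · omega
    · cases h0
  · intro hno
    apply List.pairwise_iff_getElem.mpr
    intro i j hi hj hij
    have hpm : g[i] ∈ g := List.getElem_mem hi
    have hqm : g[j] ∈ g := List.getElem_mem hj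
    by_contra hconf
    rw [Bool.not_eq_false] at hconf
    simp only [confB, meio, Bool.or_eq_true, Bool.and_eq_true, decide_eq_true_eq,
      gt_iff_lt] at hconf
    rcases hconf with ((h1 | h2) | h3) | h4
    · exact hno g[j] hqm g[i].1 (List.mem_flatMap.mpr ⟨g[i], hpm, by simp⟩) (by omega)
    · exact hno g[j] hqm g[i].2 (List.mem_flatMap.mpr ⟨g[i], hpm, by simp⟩) (by omega)
    · exact hno g[i] hpm g[j].1 (List.mem_flatMap.mpr ⟨g[j], hqm, by simp⟩) (by omega)
    · exact hno g[i] hpm g[j].2 (List.mem_flatMap.mpr ⟨g[j], hqm, by simp⟩) (by omega)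

theorem dayOKb_iff (g : List (Int × Int)) : dayOKb g = true ↔ PWc g := by
  unfold dayOKb
  have hsorted := PySem.List.sorted_ofList_pairwise_lt (g.flatMap (fun iv => [iv.1, iv.2]))
  set E := g.flatMap (fun iv => [iv.1, iv.2]) with hE
  set pts := PySem.List.sorted (PySem.Set.ofList E) (fun x => x) false with hpts
  have hmem : ∀ x, x ∈ pts ↔ x ∈ E := by
    intro x
    rw [hpts, PySem.List.mem_sorted]
    exact PySem.Set.mem_ofList E x
  rw [List.all_eq_true, PWc_iff_noc]
  constructor
  · intro hall p hp x hx hcon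
    have h1 := hall p hp
    have hp1 : p.1 ∈ pts := (hmem _).mpr (List.mem_flatMap.mpr ⟨p, hp, by simp⟩)
    have hiff := succ_lookup pts hsorted p.1 p.2 hp1
    have hex : ∃ y ∈ pts, p.1 < y ∧ y < p.2 := ⟨x, (hmem x).mpr hx, hcon.1, hcon.2⟩
    have hT := hiff.mpr hex
    rw [hT] at h1
    simp at h1
  · intro hno iv hiv
    have hp1 : iv.1 ∈ pts := (hmem _).mpr (List.mem_flatMap.mpr ⟨iv, hiv, by simp⟩)
    have hiff := succ_lookup pts hsorted iv.1 iv.2 hp1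
    by_contra hL
    simp only [Bool.not_eq_true, Bool.not_eq_false'] at hL
    obtain ⟨x, hx, h1, h2⟩ := hiff.mp hL
    exact hno iv hiv x ((hmem x).mp hx) ⟨h1, h2⟩

-- per-student equivalence ---------------------------------------------------
theorem student_eq (U : PySem.Dict String (List Int)) (lst : List String) :
    (let st := lst.foldl (uStep U) (PySem.Dict.empty, true)
     if st.2 then some (horaTotal st.1) else none)
    = (if lst.all (fun uc => U.contains uc) then
        let dt := lst.foldl (bAdd U) (PySem.Dict.empty, 0)
        if dt.1.values.foldl dayCheck true then some dt.2 else none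
      else none) := by
  dsimp only
  have hnodup0 : (PySem.Dict.empty : PySem.Dict Int (List (Int × Int))).keys.Nodup :=
    PySem.Dict.nodup_keys_empty
  have hpw0 : ∀ k, PWc ((PySem.Dict.empty : PySem.Dict Int (List (Int × Int))).getD k []) := by
    intro k
    have : (PySem.Dict.empty : PySem.Dict Int (List (Int × Int))).getD k [] = [] := rfl
    rw [this]; exact List.Pairwise.nil
  have hiff := cond_iff U lst PySem.Dict.empty hnodup0 hpw0
  have hndtab : (lst.foldl (addU U) PySem.Dict.empty).keys.Nodup :=
    nodup_keys_tab U lst _ hnodup0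
  have hvals : (lst.foldl (addU U) PySem.Dict.empty).values
      = (lst.foldl (addU U) PySem.Dict.empty).keys.map
        (fun k => (lst.foldl (addU U) PySem.Dict.empty).getD k []) :=
    PySem.Dict.values_eq_map_keys _ hndtab []
  by_cases hall : lst.all (fun uc => U.contains uc) = true
  · rw [if_pos hall, foldl_bAdd]
    dsimp only
    by_cases hcond : condA U PySem.Dict.empty lst
    · rw [foldl_uStep_of_cond U lst _ hcond]
      dsimp only
      have hpwall := (hiff.mp hcond).2
      have hok : (lst.foldl (addU U) PySem.Dict.empty).values.foldl dayCheck true = true := by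
        rw [foldl_dayCheck, Bool.true_and, List.all_eq_true]
        intro ivs hivs
        rw [hvals] at hivs
        obtain ⟨k, hk, rfl⟩ := List.mem_map.mp hivs
        exact (dayOKb_iff _).mpr (hpwall k)
      rw [if_pos rfl, hok, if_pos rfl, horaTotal_tab U lst _ hnodup0]
      norm_num
      rfl
    · have hA := foldl_uStep_of_not_cond U lst _ hcond
      rw [hA, if_neg (by simp)]
      have hnp : ¬ (∀ k, PWc ((lst.foldl (addU U) PySem.Dict.empty).getD k [])) := by
        intro hP
        exact hcond (hiff.mpr ⟨fun uc huc => List.all_eq_true.mp hall uc huc, hP⟩)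
      obtain ⟨k, hkP⟩ := not_forall.mp hnp
      have hkmem : k ∈ (lst.foldl (addU U) PySem.Dict.empty).keys := by
        by_contra hnk
        have hc0 : (lst.foldl (addU U) PySem.Dict.empty).contains k = false := by
          by_contra hcc
          exact hnk ((PySem.Dict.contains_iff_mem_keys _ k).mp (by simpa using hcc))
        have : (lst.foldl (addU U) PySem.Dict.empty).getD k [] = [] :=
          PySem.Dict.getD_of_not_contains _ [] hc0
        rw [this] at hkP
        exact hkP List.Pairwise.nil
      have hok : (lst.foldl (addU U) PySem.Dict.empty).values.foldl dayCheck true = false := by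
        rw [foldl_dayCheck, Bool.true_and]
        apply List.all_eq_false.mpr
        refine ⟨(lst.foldl (addU U) PySem.Dict.empty).getD k [], ?_, ?_⟩
        · rw [hvals]; exact List.mem_map.mpr ⟨k, hkmem, rfl⟩
        · by_contra hT
          exact hkP ((dayOKb_iff _).mp (by revert hT; cases dayOKb ((lst.foldl (addU U) PySem.Dict.empty).getD k []) <;> simp))
      rw [hok, if_neg (by simp)]
  · rw [if_neg hall]
    have hncond : ¬ condA U PySem.Dict.empty lst := by
      intro hcond
      apply hall
      rw [List.all_eq_true]
      exact (hiff.mp hcond).1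
    rw [foldl_uStep_of_not_cond U lst _ hncond, if_neg (by simp)]

-- ===== VERDICT (by name: the statement is the Claim_ definition above) =====
theorem fold_students_eq (U : PySem.Dict String (List Int))
    (alunos : List (String × List String)) (r : List (String × Int)) :
    alunos.foldl (fun r al =>
      let st := al.2.foldl (uStep U) (PySem.Dict.empty, true)
      if st.2 then r ++ [(al.1, horaTotal st.1)] else r) r
    = alunos.foldl (fun res al =>
      if al.2.all (fun uc => U.contains uc) then
        let dt := al.2.foldl (bAdd U) (PySem.Dict.empty, 0)
        let ok := dt.1.values.foldl dayCheck true
        if ok then res ++ [(al.1, dt.2)] else res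
      else res) r := by
  induction alunos generalizing r with
  | nil => rfl
  | cons al rest ih =>
    rw [List.foldl_cons, List.foldl_cons]
    have hstep :
        (let st := al.2.foldl (uStep U) (PySem.Dict.empty, true)
         if st.2 then r ++ [(al.1, horaTotal st.1)] else r)
        = (if al.2.all (fun uc => U.contains uc) then
            let dt := al.2.foldl (bAdd U) (PySem.Dict.empty, 0)
            let ok := dt.1.values.foldl dayCheck true
            if ok then r ++ [(al.1, dt.2)] else r
          else r) := by
      clear ih
      have h := student_eq U al.2
      dsimp only at h ⊢
      by_cases hall : al.2.all (fun uc => U.contains uc) = true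
      · rw [if_pos hall] at h ⊢
        cases hA : (al.2.foldl (uStep U) (PySem.Dict.empty, true)).2 <;>
          cases hok : ((al.2.foldl (bAdd U) (PySem.Dict.empty, 0)).1.values.foldl dayCheck true) <;>
          simp_all
      · rw [if_neg hall] at h ⊢
        cases hA : (al.2.foldl (uStep U) (PySem.Dict.empty, true)).2 <;> simp_all
    rw [hstep, ih]

theorem horario_spec : Claim_equal_horario := by
  unfold Claim_equal_horario
  intro ucs alunos _ _
  unfold Spec_horario horario horario_alt
  dsimp only
  rw [fold_students_eq]
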